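-- pv_equiv track=rewrite | github.com/hooman-b/Xrostomia_ML_Pipeline | WeeklyCTs_collection/DataframePanel.py | map_element_to_week
-- ===== SOURCE A (Python) =====
-- def map_element_to_week(element, accelerated_rt):
--     """
--     Type: static method
--
--     Input: 1. element: Is the element that we want to find a week for it.
--            2. accelerated_rt: is the plan type of the patient.
--
--     Explanation: this static method get an element let's say 7 with a RT plan type, then assign a proper
--                  week for this element and return the week.
--
--     Output: 1. is a week.
--     """
--     if accelerated_rt == 0:
--         element_ranges = {(0, 5): 'Week1', (5, 10): 'Week2', (10, 15): 'Week3', (15, 20): 'Week4',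
--                           (20, 25): 'Week5', (25, 30): 'Week6', (30, 35): 'Week7'}
--
--     else:
--         element_ranges = {(0, 6): 'Week1', (6, 12): 'Week2', (12, 18): 'Week3',
--                        (18, 24): 'Week4', (24, 30): 'Week5', (30, 36): 'Week6'}
--
--     for key in element_ranges.keys():
--
--         if element > key[0] and element <= key[1]:
--             return element_ranges[key]
-- ===== SOURCE B (Python) =====
-- def map_element_to_week(element, accelerated_rt):
--     width, weeks = (5, 7) if accelerated_rt == 0 else (6, 6)
--     if element <= 0 or element > width * weeks:
--         return None
--     return 'Week%d' % (-(-element // width))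
-- ===== Notes on version B (the rewrite author's own statement) =====
-- stated objective: simpler
-- what changed: Replaced the scan over a dict of (lo,hi)->label intervals with a closed-form ceiling division: Week ceil(element/width) with width 5 (7 weeks) or 6 (6 weeks).
import Mathlib
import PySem

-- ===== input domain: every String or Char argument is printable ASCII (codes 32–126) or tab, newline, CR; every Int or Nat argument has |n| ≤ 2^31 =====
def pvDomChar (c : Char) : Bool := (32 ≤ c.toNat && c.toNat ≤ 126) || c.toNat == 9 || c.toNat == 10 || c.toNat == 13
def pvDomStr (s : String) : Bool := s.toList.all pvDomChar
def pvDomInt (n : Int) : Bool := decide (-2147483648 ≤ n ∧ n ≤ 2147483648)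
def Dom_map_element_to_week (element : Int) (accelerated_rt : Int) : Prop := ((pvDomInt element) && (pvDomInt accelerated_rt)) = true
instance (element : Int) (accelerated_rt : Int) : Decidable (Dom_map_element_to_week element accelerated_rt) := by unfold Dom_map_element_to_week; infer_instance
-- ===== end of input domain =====

-- ===== PORT A =====
-- B replaces the interval-dict scan with a closed-form ceiling division (objective: simpler).
-- helper: the loop over element_ranges.keys() with its early return
def pvScan (element : Int) : List ((Int × Int) × String) → Option String
  | [] => none
  | (key, lbl) :: rest =>
      if element > key.1 ∧ element ≤ key.2 then some lbl else pvScan element rest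

def map_element_to_week (element : Int) (accelerated_rt : Int) : Option String :=
  let element_ranges : List ((Int × Int) × String) :=
    if accelerated_rt == 0 then
      [((0, 5), "Week1"), ((5, 10), "Week2"), ((10, 15), "Week3"), ((15, 20), "Week4"),
       ((20, 25), "Week5"), ((25, 30), "Week6"), ((30, 35), "Week7")]
    else
      [((0, 6), "Week1"), ((6, 12), "Week2"), ((12, 18), "Week3"),
       ((18, 24), "Week4"), ((24, 30), "Week5"), ((30, 36), "Week6")]
  pvScan element element_ranges

-- ===== PORT B =====
def map_element_to_week_alt (element : Int) (accelerated_rt : Int) : Option String :=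
  let width : Int := if accelerated_rt == 0 then 5 else 6
  let weeks : Int := if accelerated_rt == 0 then 7 else 6
  if element ≤ 0 ∨ element > width * weeks then none
  else some ("Week" ++ PySem.Int.toStr (-(PySem.Int.floordiv (-element) width)))

-- ===== PRECONDITION & SPEC =====
def Spec_map_element_to_week (element : Int) (accelerated_rt : Int) (out : Option String) : Prop := out = map_element_to_week_alt element accelerated_rt
instance (element : Int) (accelerated_rt : Int) (out : Option String) : Decidable (Spec_map_element_to_week element accelerated_rt out) := by unfold Spec_map_element_to_week; infer_instance

-- ===== CLAIM (what is proved, stated in full; the proofs are below) =====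
def Claim_equal_map_element_to_week : Prop := ∀ (element : Int) (accelerated_rt : Int), Dom_map_element_to_week element accelerated_rt → Spec_map_element_to_week element accelerated_rt (map_element_to_week element accelerated_rt)

-- ===== LEMMAS AND PROOFS =====

-- ===== VERDICT (by name: the statement is the Claim_ definition above) =====
theorem map_element_to_week_spec : Claim_equal_map_element_to_week := by
  intro element acc _
  unfold Spec_map_element_to_week map_element_to_week map_element_to_week_alt
  by_cases hacc : acc == 0 <;> simp only [hacc, if_true, if_false, Bool.false_eq_true] <;>
  · rcases le_or_gt element 0 with h0 | h0
    · simp only [pvScan]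
      split_ifs <;> first | rfl | omega
    · rcases le_or_gt element 36 with h1 | h1
      · interval_cases element <;> decide
      · simp only [pvScan]
        split_ifs <;> first | rfl | omega
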